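-- pv_equiv track=rewrite | github.com/tomjedusor934/Epitech-Zappy | zappy_ia/agent_getters.py | get_player_case_items
-- ===== SOURCE A (Python) =====
-- def get_player_case_items(vision):
--     items = vision.get((0, 0))
--     nbfood = 0
--     nblinemate = 0
--     nbderaumere = 0
--     nbsibur = 0
--     nbmendiane = 0
--     nbphiras = 0
--     nbthystame = 0
--
--     if items is None:
--         return 0, 0, 0, 0, 0, 0, 0
--     for item in items:
--         if item == 'food':
--             nbfood += 1
--         elif item == 'linemate':
--             nblinemate += 1
--         elif item == 'deraumere':
--             nbderaumere += 1
--         elif item == 'sibur':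
--             nbsibur += 1
--         elif item == 'mendiane':
--             nbmendiane += 1
--         elif item == 'phiras':
--             nbphiras += 1
--         elif item == 'thystame':
--             nbthystame += 1
--
--     return nbfood, nblinemate, nbderaumere, nbsibur, nbmendiane, nbphiras, nbthystame
-- ===== SOURCE B (Python) =====
-- def get_player_case_items(vision):
--     items = vision.get((0, 0))
--     if items is None:
--         return 0, 0, 0, 0, 0, 0, 0
--     return (items.count('food'), items.count('linemate'),
--             items.count('deraumere'), items.count('sibur'),
--             items.count('mendiane'), items.count('phiras'),
--             items.count('thystame'))
-- ===== Notes on version B (the rewrite author's own statement) =====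
-- stated objective: simpler
-- what changed: The single-pass seven-accumulator loop is replaced by seven independent list.count scans, one per item label, returned directly as the tuple.
import Mathlib
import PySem

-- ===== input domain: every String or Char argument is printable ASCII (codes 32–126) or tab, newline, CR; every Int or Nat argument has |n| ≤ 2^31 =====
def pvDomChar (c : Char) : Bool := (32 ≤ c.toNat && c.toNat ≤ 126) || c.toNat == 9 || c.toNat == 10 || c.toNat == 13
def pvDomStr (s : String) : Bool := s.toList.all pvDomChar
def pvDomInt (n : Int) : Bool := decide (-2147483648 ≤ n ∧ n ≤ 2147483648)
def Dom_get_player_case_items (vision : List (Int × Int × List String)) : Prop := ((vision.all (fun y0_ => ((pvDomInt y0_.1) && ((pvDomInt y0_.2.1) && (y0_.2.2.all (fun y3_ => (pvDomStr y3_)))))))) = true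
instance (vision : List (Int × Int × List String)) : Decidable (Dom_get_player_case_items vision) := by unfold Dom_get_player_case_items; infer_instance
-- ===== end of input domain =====

-- B replaces A's single-pass seven-accumulator loop by seven independent count scans (simpler decomposition, same results).


-- ===== PORT A =====
def pvLoopA : List String → (Int × Int × Int × Int × Int × Int × Int) → Int × Int × Int × Int × Int × Int × Int
  | [], acc => acc
  | item :: rest, (f, l, d, s, m, p, t) =>
    if item == "food" then pvLoopA rest (f + 1, l, d, s, m, p, t)
    else if item == "linemate" then pvLoopA rest (f, l + 1, d, s, m, p, t)
    else if item == "deraumere" then pvLoopA rest (f, l, d + 1, s, m, p, t)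
    else if item == "sibur" then pvLoopA rest (f, l, d, s + 1, m, p, t)
    else if item == "mendiane" then pvLoopA rest (f, l, d, s, m + 1, p, t)
    else if item == "phiras" then pvLoopA rest (f, l, d, s, m, p + 1, t)
    else if item == "thystame" then pvLoopA rest (f, l, d, s, m, p, t + 1)
    else pvLoopA rest (f, l, d, s, m, p, t)

def get_player_case_items (vision : List (Int × Int × List String)) : Int × Int × Int × Int × Int × Int × Int :=
  match vision.find? (fun e => e.1 == 0 && e.2.1 == 0) with
  | none => (0, 0, 0, 0, 0, 0, 0)
  | some e => pvLoopA e.2.2 (0, 0, 0, 0, 0, 0, 0)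

-- ===== PORT B =====
def get_player_case_items_alt (vision : List (Int × Int × List String)) : Int × Int × Int × Int × Int × Int × Int :=
  match vision.find? (fun e => e.1 == 0 && e.2.1 == 0) with
  | none => (0, 0, 0, 0, 0, 0, 0)
  | some e =>
    ((PySem.List.count e.2.2 "food" : Int), (PySem.List.count e.2.2 "linemate" : Int),
     (PySem.List.count e.2.2 "deraumere" : Int), (PySem.List.count e.2.2 "sibur" : Int),
     (PySem.List.count e.2.2 "mendiane" : Int), (PySem.List.count e.2.2 "phiras" : Int),
     (PySem.List.count e.2.2 "thystame" : Int))

-- ===== PRECONDITION & SPEC =====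
def Spec_get_player_case_items (vision : List (Int × Int × List String)) (out : Int × Int × Int × Int × Int × Int × Int) : Prop := out = get_player_case_items_alt vision
instance (vision : List (Int × Int × List String)) (out : Int × Int × Int × Int × Int × Int × Int) : Decidable (Spec_get_player_case_items vision out) := by unfold Spec_get_player_case_items; infer_instance

-- ===== CLAIM (what is proved, stated in full; the proofs are below) =====
def Claim_equal_get_player_case_items : Prop := ∀ (vision : List (Int × Int × List String)), Dom_get_player_case_items vision → Spec_get_player_case_items vision (get_player_case_items vision)

-- ===== LEMMAS AND PROOFS =====

lemma pvLoopA_eq (items : List String) (f l d s m p t : Int) :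
    pvLoopA items (f, l, d, s, m, p, t) =
      (f + items.count "food", l + items.count "linemate", d + items.count "deraumere",
       s + items.count "sibur", m + items.count "mendiane", p + items.count "phiras",
       t + items.count "thystame") := by
  induction items generalizing f l d s m p t with
  | nil => simp [pvLoopA]
  | cons x xs ih =>
    simp only [pvLoopA, List.count_cons]
    split_ifs with h1 h2 h3 h4 h5 h6 h7 <;>
      rw [ih] <;>
      simp_all [beq_iff_eq] <;> ring

-- ===== VERDICT (by name: the statement is the Claim_ definition above) =====
theorem get_player_case_items_spec : Claim_equal_get_player_case_items := by
  intro vision _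
  unfold Spec_get_player_case_items get_player_case_items get_player_case_items_alt
  cases vision.find? (fun e => e.1 == 0 && e.2.1 == 0) with
  | none => rfl
  | some e => simp [pvLoopA_eq, PySem.List.count]
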